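-- pv_equiv track=rewrite | github.com/Flamz-8/csc299-project | FINAL/src/pkm/utils/id_matcher.py | find_matching_id
-- ===== SOURCE A (Python) =====
-- def find_matching_id(partial_id: str, available_ids: list[str]) -> str | None:
--     """Find a matching ID from a partial ID input.
--
--     Supports:
--     - Exact match (case-insensitive)
--     - Partial match from the beginning (e.g., "n1" matches "n1", "n_20251123_154149_4xl")
--     - Unique suffix match (e.g., "4xl" matches "n_20251123_154149_4xl" if unique)
--
--     Args:
--         partial_id: The partial or full ID to match
--         available_ids: List of available IDs to search
--
--     Returns:
--         The matched ID if found and unique, None otherwise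
--
--     Examples:
--         >>> find_matching_id("n1", ["n1", "n2", "n10"])
--         "n1"
--         >>> find_matching_id("N1", ["n1", "n2"])
--         "n1"
--         >>> find_matching_id("4xl", ["n_20251123_154149_4xl", "t_20251123_154149_xyz"])
--         "n_20251123_154149_4xl"
--     """
--     if not partial_id or not available_ids:
--         return None
--
--     partial_lower = partial_id.lower()
--
--     # Try exact match (case-insensitive)
--     for id_str in available_ids:
--         if id_str.lower() == partial_lower:
--             return id_str
--
--     # Try prefix match
--     prefix_matches = [id_str for id_str in available_ids if id_str.lower().startswith(partial_lower)]
--     if len(prefix_matches) == 1: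
--         return prefix_matches[0]
--     elif len(prefix_matches) > 1:
--         # Multiple matches - not unique
--         return None
--
--     # Try suffix match (for timestamp-based IDs like n_20251123_154149_4xl)
--     suffix_matches = [id_str for id_str in available_ids if id_str.lower().endswith(partial_lower)]
--     if len(suffix_matches) == 1:
--         return suffix_matches[0]
--
--     # Try contains match (anywhere in the ID)
--     contains_matches = [id_str for id_str in available_ids if partial_lower in id_str.lower()]
--     if len(contains_matches) == 1:
--         return contains_matches[0]
--
--     return None
-- ===== SOURCE B (Python) =====
-- def find_matching_id(partial_id: str, available_ids: list[str]) -> str | None: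
--     """One classification pass over available_ids, then a single decision block."""
--     if not partial_id or not available_ids:
--         return None
--     p = partial_id.lower()
--     exact, prefix, suffix, contains = [], [], [], []
--     for id_str in available_ids:
--         low = id_str.lower()
--         if low == p:
--             exact.append(id_str)
--         if low.startswith(p):
--             prefix.append(id_str)
--         if low.endswith(p):
--             suffix.append(id_str)
--         if p in low:
--             contains.append(id_str)
--     if exact:
--         return exact[0]
--     if len(prefix) == 1:
--         return prefix[0]
--     if len(prefix) > 1:
--         return None
--     if len(suffix) == 1:
--         return suffix[0]
--     if len(contains) == 1:
--         return contains[0]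
--     return None
-- ===== Notes on version B (the rewrite author's own statement) =====
-- stated objective: alternative
-- what changed: Replaced A's four separate conditional scans (early-return exact loop, then prefix/suffix/contains list comprehensions) by one classification pass that builds all four match lists together, followed by a single decision block with the same priority and fall-through rules.
import Mathlib
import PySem

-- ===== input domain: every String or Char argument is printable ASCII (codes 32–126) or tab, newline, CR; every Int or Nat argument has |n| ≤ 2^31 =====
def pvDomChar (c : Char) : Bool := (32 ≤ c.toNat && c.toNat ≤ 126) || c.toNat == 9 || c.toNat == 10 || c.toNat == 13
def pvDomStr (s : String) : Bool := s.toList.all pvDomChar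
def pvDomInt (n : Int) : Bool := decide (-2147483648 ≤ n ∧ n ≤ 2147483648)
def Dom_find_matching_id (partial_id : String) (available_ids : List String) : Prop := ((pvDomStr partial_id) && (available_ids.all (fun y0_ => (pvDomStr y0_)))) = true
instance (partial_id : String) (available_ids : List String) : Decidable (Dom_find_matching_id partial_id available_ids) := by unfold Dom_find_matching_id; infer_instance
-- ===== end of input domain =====

-- B replaces A's four conditional scans over available_ids by one classification pass
-- into four lists plus a single decision block (objective: alternative decomposition).

-- ===== PORT A =====
def find_matching_id (partial_id : String) (available_ids : List String) : Option String :=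
  if partial_id = "" ∨ available_ids = [] then none
  else
    let partial_lower := PySem.Str.lower partial_id
    -- 'for id_str in available_ids: if …: return id_str' is find?
    match available_ids.find? (fun id_str => PySem.Str.lower id_str == partial_lower) with
    | some id_str => some id_str
    | none =>
      let prefix_matches := available_ids.filter
        (fun id_str => PySem.Str.startswith (PySem.Str.lower id_str) partial_lower)
      if prefix_matches.length = 1 then prefix_matches.head?
      else if prefix_matches.length > 1 then none
      else
        let suffix_matches := available_ids.filter
          (fun id_str => PySem.Str.endswith (PySem.Str.lower id_str) partial_lower)
        if suffix_matches.length = 1 then suffix_matches.head?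
        else
          let contains_matches := available_ids.filter
            (fun id_str => PySem.Str.isIn partial_lower (PySem.Str.lower id_str))
          if contains_matches.length = 1 then contains_matches.head?
          else none

-- ===== PORT B =====
def find_matching_id_alt_step (p : String)
    (acc : List String × List String × List String × List String) (id_str : String) :
    List String × List String × List String × List String :=
  let low := PySem.Str.lower id_str
  let acc := if low == p then (acc.1 ++ [id_str], acc.2) else acc
  let acc := if PySem.Str.startswith low p then (acc.1, acc.2.1 ++ [id_str], acc.2.2) else acc
  let acc := if PySem.Str.endswith low p then (acc.1, acc.2.1, acc.2.2.1 ++ [id_str], acc.2.2.2) else acc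
  if PySem.Str.isIn p low then (acc.1, acc.2.1, acc.2.2.1, acc.2.2.2 ++ [id_str]) else acc

def find_matching_id_alt (partial_id : String) (available_ids : List String) : Option String :=
  if partial_id = "" ∨ available_ids = [] then none
  else
    let p := PySem.Str.lower partial_id
    match available_ids.foldl (find_matching_id_alt_step p) ([], [], [], []) with
    | (exact, pre, suf, cont) =>
      if exact ≠ [] then exact.head?
      else if pre.length = 1 then pre.head?
      else if pre.length > 1 then none
      else if suf.length = 1 then suf.head?
      else if cont.length = 1 then cont.head?
      else none

-- ===== PRECONDITION & SPEC =====
def Spec_find_matching_id (partial_id : String) (available_ids : List String) (out : Option String) : Prop := out = find_matching_id_alt partial_id available_ids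
instance (partial_id : String) (available_ids : List String) (out : Option String) : Decidable (Spec_find_matching_id partial_id available_ids out) := by unfold Spec_find_matching_id; infer_instance

-- ===== CLAIM (what is proved, stated in full; the proofs are below) =====
def Claim_equal_find_matching_id : Prop := ∀ (partial_id : String) (available_ids : List String), Dom_find_matching_id partial_id available_ids → Spec_find_matching_id partial_id available_ids (find_matching_id partial_id available_ids)

-- ===== LEMMAS AND PROOFS =====

-- B's single fold produces exactly the four filtered lists (appended to the accumulators).
theorem alt_fold_eq (p : String) (xs : List String)
    (e pr sf ct : List String) :
    xs.foldl (find_matching_id_alt_step p) (e, pr, sf, ct) =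
      (e ++ xs.filter (fun s => PySem.Str.lower s == p),
       pr ++ xs.filter (fun s => PySem.Str.startswith (PySem.Str.lower s) p),
       sf ++ xs.filter (fun s => PySem.Str.endswith (PySem.Str.lower s) p),
       ct ++ xs.filter (fun s => PySem.Str.isIn p (PySem.Str.lower s))) := by
  induction xs generalizing e pr sf ct with
  | nil => simp
  | cons x xs ih =>
    simp only [List.foldl_cons, List.filter_cons]
    have hstep : find_matching_id_alt_step p (e, pr, sf, ct) x =
        ((if PySem.Str.lower x == p then e ++ [x] else e),
         (if PySem.Str.startswith (PySem.Str.lower x) p then pr ++ [x] else pr),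
         (if PySem.Str.endswith (PySem.Str.lower x) p then sf ++ [x] else sf),
         (if PySem.Str.isIn p (PySem.Str.lower x) then ct ++ [x] else ct)) := by
      unfold find_matching_id_alt_step
      dsimp only
      split_ifs <;> rfl
    rw [hstep, ih]
    split_ifs <;> simp

-- find? is the head of the filtered list.
theorem find?_eq_head?_filter (f : String → Bool) (xs : List String) :
    xs.find? f = (xs.filter f).head? := by
  induction xs with
  | nil => rfl
  | cons x xs ih =>
    by_cases h : f x
    · rw [List.find?_cons_of_pos h, List.filter_cons_of_pos h]
      rfl
    · rw [List.find?_cons_of_neg h, List.filter_cons_of_neg h, ih]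

-- ===== VERDICT (by name: the statement is the Claim_ definition above) =====
theorem find_matching_id_spec : Claim_equal_find_matching_id := by
  intro partial_id available_ids _
  show find_matching_id partial_id available_ids = find_matching_id_alt partial_id available_ids
  unfold find_matching_id find_matching_id_alt
  by_cases h0 : partial_id = "" ∨ available_ids = []
  · simp [h0]
  · simp only [h0, if_false]
    rw [alt_fold_eq, find?_eq_head?_filter]
    simp only [List.nil_append]
    cases hE : (available_ids.filter
        (fun s => PySem.Str.lower s == PySem.Str.lower partial_id)).head? with
    | some s =>
      have : available_ids.filter
          (fun s => PySem.Str.lower s == PySem.Str.lower partial_id) ≠ [] := by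
        intro h; rw [h] at hE; simp at hE
      simp [this]
    | none =>
      have : available_ids.filter
          (fun s => PySem.Str.lower s == PySem.Str.lower partial_id) = [] :=
        List.head?_eq_none_iff.mp hE
      simp [this]
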